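-- pv_equiv track=rewrite | github.com/DayByDayBy/cluas | src/prompts/character_prompts.py | _format_observation_memory
-- ===== SOURCE A (Python) =====
-- from typing import Optional, List, Dict, Any
--
-- def _format_observation_memory(recent_observations: Optional[List[Dict[str, Any]]] = None) -> str:
--     """
--     Format observation memory for Crow.
--
--     Args:
--         recent_observations: List of dicts with keys like 'type', 'location', 'date', 'conditions'
--
--     Returns:
--         Formatted string to append to system prompt, or empty string if no observations.
--     """
--     if not recent_observations:
--         return ""
--
--     # Count by type
--     counts: Dict[str, int] = {}
--     for obs in recent_observations:
--         obs_type = obs.get("type", "observation")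
--         counts[obs_type] = counts.get(obs_type, 0) + 1
--
--     lines = [
--         "\n\nRECENT OBSERVATIONS:",
--         f"You have logged {len(recent_observations)} observations recently:"
--     ]
--
--     for obs_type, count in sorted(counts.items()):
--         lines.append(f"- {count} × {obs_type}")
--
--     lines.append("\nReference these patterns if relevant to the discussion.\n")
--     return "\n".join(lines)
-- ===== SOURCE B (Python) =====
-- from typing import Optional, List, Dict, Any
--
-- def _format_observation_memory(recent_observations: Optional[List[Dict[str, Any]]] = None) -> str:
--     if not recent_observations:
--         return ""
--     types = sorted(obs.get("type", "observation") for obs in recent_observations)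
--     lines = [
--         "\n\nRECENT OBSERVATIONS:",
--         f"You have logged {len(recent_observations)} observations recently:",
--     ]
--     i = 0
--     n = len(types)
--     while i < n:
--         j = i + 1
--         while j < n and types[j] == types[i]:
--             j += 1
--         lines.append(f"- {j - i} × {types[i]}")
--         i = j
--     lines.append("\nReference these patterns if relevant to the discussion.\n")
--     return "\n".join(lines)
-- ===== Notes on version B (the rewrite author's own statement) =====
-- stated objective: alternative
-- what changed: B replaces A's hash-dict counting pass plus item sort with sorting the extracted type list once and emitting one line per maximal run of equal strings in a single index scan.
import Mathlib
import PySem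

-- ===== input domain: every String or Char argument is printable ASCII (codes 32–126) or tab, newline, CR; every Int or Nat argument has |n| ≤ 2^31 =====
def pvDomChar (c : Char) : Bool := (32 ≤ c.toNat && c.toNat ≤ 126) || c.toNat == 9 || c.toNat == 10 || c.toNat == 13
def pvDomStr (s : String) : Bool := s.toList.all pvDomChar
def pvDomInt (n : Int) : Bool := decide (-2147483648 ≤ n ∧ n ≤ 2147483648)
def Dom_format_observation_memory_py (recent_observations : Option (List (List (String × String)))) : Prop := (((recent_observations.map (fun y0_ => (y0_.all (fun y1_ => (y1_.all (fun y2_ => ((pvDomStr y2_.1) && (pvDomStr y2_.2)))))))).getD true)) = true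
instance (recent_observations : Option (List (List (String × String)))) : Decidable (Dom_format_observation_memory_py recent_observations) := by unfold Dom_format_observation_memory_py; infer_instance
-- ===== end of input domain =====

-- B re-implements the summary by sorting the type list once and scanning consecutive runs,
-- instead of A's hash-counting dict followed by sorting the (type, count) items. Same output; objective: alternative.

-- ===== PORT A =====
def format_observation_memory_py (recent_observations : Option (List (List (String × String)))) : String :=
  match recent_observations with
  | none => ""
  | some l =>
    if l.isEmpty then "" else
      -- counts: Dict[str, int]; counts[obs_type] = counts.get(obs_type, 0) + 1
      let counts : PySem.Dict String Int :=
        l.foldl (fun counts obs =>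
          let obs_type := (PySem.Dict.mk obs).getD "type" "observation"
          counts.insert obs_type (counts.getD obs_type 0 + 1)) PySem.Dict.empty
      let lines : List String :=
        ["\n\nRECENT OBSERVATIONS:",
         "You have logged " ++ PySem.Int.toStr (l.length : Int) ++ " observations recently:"]
      -- for obs_type, count in sorted(counts.items()): lines.append(f"- {count} × {obs_type}")
      let lines := (PySem.List.sorted2 counts.items (fun p => p.1) (fun p => p.2) false).foldl
        (fun lines p => lines ++ ["- " ++ PySem.Int.toStr p.2 ++ " × " ++ p.1]) lines
      let lines := lines ++ ["\nReference these patterns if relevant to the discussion.\n"]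
      PySem.Str.join "\n" lines

-- ===== PORT B =====
-- B's index while-loop over the sorted list: each step consumes one maximal run of equal
-- strings (j - i = 1 + length of the following equal run) and emits one line.
def pvBGroupLoop (types : List String) (lines : List String) : List String :=
  match types with
  | [] => lines
  | x :: tl =>
      let run := tl.takeWhile (fun y => y == x)
      let rest := tl.dropWhile (fun y => y == x)
      pvBGroupLoop rest (lines ++ ["- " ++ PySem.Int.toStr ((1 + run.length : Nat) : Int) ++ " × " ++ x])
termination_by types.length
decreasing_by
  simp only [List.length_cons]
  exact Nat.lt_succ_of_le (List.length_dropWhile_le _ _)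

def format_observation_memory_py_alt (recent_observations : Option (List (List (String × String)))) : String :=
  match recent_observations with
  | none => ""
  | some l =>
    if l.isEmpty then "" else
      let types := PySem.List.sorted
        (l.map (fun obs => (PySem.Dict.mk obs).getD "type" "observation")) (fun x => x) false
      let lines : List String :=
        ["\n\nRECENT OBSERVATIONS:",
         "You have logged " ++ PySem.Int.toStr (l.length : Int) ++ " observations recently:"]
      let lines := pvBGroupLoop types lines
      let lines := lines ++ ["\nReference these patterns if relevant to the discussion.\n"]
      PySem.Str.join "\n" lines

-- ===== PRECONDITION & SPEC =====
def Spec_format_observation_memory_py (recent_observations : Option (List (List (String × String)))) (out : String) : Prop := out = format_observation_memory_py_alt recent_observations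
instance (recent_observations : Option (List (List (String × String)))) (out : String) : Decidable (Spec_format_observation_memory_py recent_observations out) := by unfold Spec_format_observation_memory_py; infer_instance

-- ===== CLAIM (what is proved, stated in full; the proofs are below) =====
def Claim_equal_format_observation_memory_py : Prop := ∀ (recent_observations : Option (List (List (String × String)))), Dom_format_observation_memory_py recent_observations → Spec_format_observation_memory_py recent_observations (format_observation_memory_py recent_observations)

-- ===== LEMMAS AND PROOFS =====

-- insertBy only looks at `before x y` for y in the list
theorem pv_insertBy_congr {α : Type} (f g : α → α → Bool) (x : α) (ys : List α)
    (h : ∀ y ∈ ys, f x y = g x y) :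
    PySem.List.insertBy f x ys = PySem.List.insertBy g x ys := by
  induction ys with
  | nil => rfl
  | cons y ys ih =>
    simp only [PySem.List.insertBy]
    rw [h y (List.mem_cons_self)]
    split
    · rfl
    · rw [ih (fun z hz => h z (List.mem_cons_of_mem _ hz))]

theorem pv_foldl_insertBy_congr {α : Type} (f g : α → α → Bool) (L : List α)
    (hfg : ∀ a ∈ L, ∀ b ∈ L, f a b = g a b) :
    ∀ (xs acc : List α), (∀ a ∈ xs, a ∈ L) → (∀ a ∈ acc, a ∈ L) →
      xs.foldl (fun acc x => PySem.List.insertBy f x acc) acc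
        = xs.foldl (fun acc x => PySem.List.insertBy g x acc) acc := by
  intro xs
  induction xs with
  | nil => intro acc _ _; rfl
  | cons x xs ih =>
    intro acc hxs hacc
    simp only [List.foldl_cons]
    have hx : x ∈ L := hxs x List.mem_cons_self
    rw [pv_insertBy_congr f g x acc (fun y hy => hfg x hx y (hacc y hy))]
    exact ih _ (fun a ha => hxs a (List.mem_cons_of_mem _ ha))
      (fun a ha => by
        rcases (PySem.List.mem_insertBy g x a acc).mp ha with h | h
        · exact h ▸ hx
        · exact hacc a h)

-- when the primary keys of the elements are pairwise comparable-and-separating,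
-- the two-key sort coincides with the sort on the first key alone
theorem pv_sorted2_eq_sorted {α κ₁ κ₂ : Type} [LT κ₁] [DecidableLT κ₁] [LT κ₂] [DecidableLT κ₂]
    (xs : List α) (k1 : α → κ₁) (k2 : α → κ₂)
    (htotal : ∀ a ∈ xs, ∀ b ∈ xs, ¬ k1 a < k1 b → ¬ k1 b < k1 a → a = b)
    (hirr2 : ∀ c : κ₂, ¬ c < c) :
    PySem.List.sorted2 xs k1 k2 false = PySem.List.sorted xs k1 false := by
  simp only [PySem.List.sorted2, PySem.List.sorted, if_neg (by decide : ¬ (false = true))]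
  apply pv_foldl_insertBy_congr _ _ xs _ xs [] (fun a ha => ha) (fun a ha => absurd ha (List.not_mem_nil))
  intro a ha b hb
  by_cases hab : k1 a < k1 b
  · simp [hab]
  · by_cases hba : k1 b < k1 a
    · simp [hab, hba]
    · have : a = b := htotal a ha b hb hab hba
      subst this
      simp [hab, hirr2 (k2 a)]

-- set(l) is a sublist of l
theorem pv_ofList_sublist {α : Type} [BEq α] [LawfulBEq α] (l : List α) :
    (PySem.Set.ofList l).Sublist l := by
  induction l with
  | nil => simp [PySem.Set.ofList, PySem.Set.empty]
  | cons x l ih =>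
    rw [PySem.Set.ofList_cons]
    exact List.Sublist.cons₂ x ((List.filter_sublist).trans ih)

-- prepending the head plus a run of copies of it changes set(·) by a single cons
theorem pv_ofList_cons_run {α : Type} [BEq α] [LawfulBEq α] (x : α) (run rest : List α)
    (hrun : ∀ y ∈ run, y = x) (hx : x ∉ rest) :
    PySem.Set.ofList (x :: (run ++ rest)) = x :: PySem.Set.ofList rest := by
  have hstep : ∀ (r : List α), (∀ y ∈ r, y = x) → r.foldl PySem.Set.add [x] = [x] := by
    intro r
    induction r with
    | nil => intro _; rfl
    | cons y r ih =>
      intro hr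
      have hy : y = x := hr y List.mem_cons_self
      subst hy
      simp only [List.foldl_cons]
      rw [PySem.Set.add_of_mem (List.mem_singleton.mpr rfl)]
      exact ih (fun z hz => hr z (List.mem_cons_of_mem _ hz))
  have h1 : PySem.Set.ofList (x :: (run ++ rest)) = PySem.Set.ofList (x :: rest) := by
    rw [PySem.Set.ofList_eq_foldl, PySem.Set.ofList_eq_foldl]
    simp only [List.foldl_cons, List.foldl_append]
    rw [show PySem.Set.add [] x = [x] from rfl, hstep run hrun]
  rw [h1, PySem.Set.ofList_cons]
  congr 1
  simp only [PySem.Set.discard]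
  apply List.filter_eq_self.mpr
  intro a ha
  have : a ∈ rest := (PySem.Set.mem_ofList rest a).mp ha
  simp only [Bool.not_eq_eq_eq_not, Bool.not_true, beq_eq_false_iff_ne]
  exact fun h => hx (h ▸ this)

-- B's run-scanning loop on a (≤)-sorted list emits one line per distinct type,
-- in first-occurrence (= increasing) order, counting multiplicities
theorem pv_bLoop_spec : ∀ (n : Nat) (S : List String), S.length ≤ n → S.Pairwise (· ≤ ·) →
    ∀ lines : List String,
      pvBGroupLoop S lines
        = lines ++ (PySem.Set.ofList S).map
            (fun k => "- " ++ PySem.Int.toStr ((S.count k : Nat) : Int) ++ " × " ++ k) := by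
  intro n
  induction n with
  | zero =>
    intro S hS _ lines
    have : S = [] := List.eq_nil_of_length_eq_zero (Nat.le_zero.mp hS)
    subst this
    simp [pvBGroupLoop, PySem.Set.ofList, PySem.Set.empty]
  | succ n ih =>
    intro S hS hsort lines
    match S with
    | [] => simp [pvBGroupLoop, PySem.Set.ofList, PySem.Set.empty]
    | x :: tl =>
      have hhead : ∀ y ∈ tl, x ≤ y := (List.pairwise_cons.mp hsort).1
      have htlsort : tl.Pairwise (· ≤ ·) := (List.pairwise_cons.mp hsort).2
      set run := tl.takeWhile (fun y => y == x) with hrundef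
      set rest := tl.dropWhile (fun y => y == x) with hrestdef
      have hsplit : run ++ rest = tl := List.takeWhile_append_dropWhile
      have hrun : ∀ y ∈ run, y = x := fun y hy => eq_of_beq (List.mem_takeWhile_imp (p := fun y => y == x) hy)
      have hrestsort : rest.Pairwise (· ≤ ·) := htlsort.sublist (List.dropWhile_sublist _)
      have hxrest : x ∉ rest := by
        rw [hrestdef]
        cases hr : tl.dropWhile (fun y => y == x) with
        | nil => simp
        | cons y ys =>
          have hyx : (y == x) = false := by
            have := List.head_dropWhile_not (fun y => y == x) (l := tl) (by simp [hr])
            simpa [hr] using this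
          have hsub : (y :: ys).Sublist tl := hr ▸ List.dropWhile_sublist _
          have hys : (y :: ys).Pairwise (· ≤ ·) := htlsort.sublist hsub
          have hymem : y ∈ tl := hsub.mem List.mem_cons_self
          have hxy : x < y := lt_of_le_of_ne (hhead y hymem)
            (by intro h; rw [← h] at hyx; simp at hyx)
          intro hmem
          rcases List.mem_cons.mp hmem with h | h
          · rw [h] at hyx; simp at hyx
          · exact absurd hxy (not_lt.mpr ((List.pairwise_cons.mp hys).1 x h))
      have hrestlen : rest.length ≤ n := by
        have h1 : rest.length ≤ tl.length := List.length_dropWhile_le _ _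
        have h2 : tl.length + 1 ≤ n + 1 := by simpa using hS
        omega
      rw [pvBGroupLoop]
      rw [ih rest hrestlen hrestsort]
      have hofList : PySem.Set.ofList (x :: tl) = x :: PySem.Set.ofList rest := by
        rw [← hsplit]; exact pv_ofList_cons_run x run rest hrun hxrest
      rw [hofList]
      have hcountx : (x :: tl).count x = 1 + run.length := by
        rw [← hsplit, List.count_cons, List.count_append]
        have h1 : run.count x = run.length := List.count_eq_length.mpr (fun b hb => (hrun b hb).symm)
        have h2 : rest.count x = 0 := List.count_eq_zero.mpr hxrest
        simp [h1, h2]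
        omega
      have hcountk : ∀ k ∈ PySem.Set.ofList rest, (x :: tl).count k = rest.count k := by
        intro k hk
        have hkrest : k ∈ rest := (PySem.Set.mem_ofList rest k).mp hk
        have hkx : k ≠ x := fun h => hxrest (h ▸ hkrest)
        rw [← hsplit, List.count_cons, List.count_append]
        have h1 : run.count k = 0 := List.count_eq_zero.mpr (fun hkr => hkx (hrun k hkr))
        have h2 : (x == k) = false := beq_eq_false_iff_ne.mpr (fun h => hkx h.symm)
        simp [h1, h2]
      rw [List.map_cons, hcountx]
      have hmapeq : List.map (fun k => "- " ++ PySem.Int.toStr (((x :: tl).count k : Nat) : Int) ++ " × " ++ k)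
            (PySem.Set.ofList rest)
          = List.map (fun k => "- " ++ PySem.Int.toStr ((rest.count k : Nat) : Int) ++ " × " ++ k)
            (PySem.Set.ofList rest) :=
        List.map_congr_left (fun k hk => by rw [hcountk k hk])
      rw [hmapeq]
      simp only [List.append_assoc, List.singleton_append]
      rw [← hrundef]

-- A's dict of counts, sorted on items, is the strictly increasing list of
-- (type, multiplicity) pairs
theorem pv_aSorted_spec (ts : List String) :
    PySem.List.sorted2 (PySem.Dict.counter ts).items (fun p => p.1) (fun p => p.2) false
      = (PySem.List.sorted (PySem.Set.ofList ts) (fun x => x) false).map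
          (fun k => (k, ((ts.count k : Nat) : Int))) := by
  rw [PySem.Dict.items_counter]
  set f : String → String × Int := fun k => (k, ((ts.count k : Nat) : Int)) with hf
  set items := (PySem.Set.ofList ts).map f with hitems
  have hnodup : (PySem.Set.ofList ts).Nodup := PySem.Set.nodup_ofList ts
  rw [pv_sorted2_eq_sorted items (fun p => p.1) (fun p => p.2)
    (by
      intro a ha b hb hab hba
      have h1 : a.1 = b.1 := le_antisymm (not_lt.mp hba) (not_lt.mp hab)
      rcases List.mem_map.mp (hitems ▸ ha) with ⟨ka, hka, rfl⟩
      rcases List.mem_map.mp (hitems ▸ hb) with ⟨kb, hkb, rfl⟩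
      simp only [hf] at h1 ⊢
      rw [h1]
      )
    (fun c => lt_irrefl c)]
  apply PySem.List.sorted_eq_of_perm_of_pairwise_lt
  · exact (PySem.List.sorted_perm (PySem.Set.ofList ts) (fun x => x) false).map f
  · rw [List.pairwise_map]
    exact PySem.List.sorted_ofList_pairwise_lt ts

-- set of the sorted list IS the sorted set
theorem pv_ofList_sorted (ts : List String) :
    PySem.Set.ofList (PySem.List.sorted ts (fun x => x) false)
      = PySem.List.sorted (PySem.Set.ofList ts) (fun x => x) false := by
  set S := PySem.List.sorted ts (fun x => x) false with hS
  have hperm : (PySem.Set.ofList S).Perm (PySem.Set.ofList ts) := by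
    apply (List.perm_ext_iff_of_nodup (PySem.Set.nodup_ofList S) (PySem.Set.nodup_ofList ts)).mpr
    intro a
    rw [PySem.Set.mem_ofList, PySem.Set.mem_ofList, hS, PySem.List.mem_sorted]
  have hpair : (PySem.Set.ofList S).Pairwise (· < ·) := by
    have h1 : S.Pairwise (· ≤ ·) := PySem.List.sorted_pairwise ts (fun x => x)
    have h2 : (PySem.Set.ofList S).Pairwise (· ≤ ·) := h1.sublist (pv_ofList_sublist S)
    have h3 : (PySem.Set.ofList S).Pairwise (· ≠ ·) := PySem.Set.nodup_ofList S
    exact (h2.and h3).imp (fun h => lt_of_le_of_ne h.1 h.2)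
  exact (PySem.List.sorted_eq_of_perm_of_pairwise_lt _ _ _ hperm hpair).symm

-- ===== VERDICT (by name: the statement is the Claim_ definition above) =====
theorem format_observation_memory_py_spec : Claim_equal_format_observation_memory_py := by
  intro recent_observations _
  unfold Spec_format_observation_memory_py format_observation_memory_py format_observation_memory_py_alt
  match recent_observations with
  | none => rfl
  | some l =>
    by_cases hl : l.isEmpty
    · simp [hl]
    · simp only [hl, if_neg, Bool.false_eq_true, not_false_iff]
      congr 1
      -- both sides: header ++ per-type lines ++ footer
      set ts := l.map (fun obs => (PySem.Dict.mk obs).getD "type" "observation") with hts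
      set S := PySem.List.sorted ts (fun x => x) false with hSdef
      -- A's counting loop is Counter(ts)
      have hcounts : l.foldl (fun counts obs =>
          let obs_type := (PySem.Dict.mk obs).getD "type" "observation"
          counts.insert obs_type (counts.getD obs_type 0 + 1)) PySem.Dict.empty
          = PySem.Dict.counter ts := by
        rw [hts]
        exact ((List.foldl_map (f := fun obs => (PySem.Dict.mk obs).getD "type" "observation")
          (g := fun (d : PySem.Dict String Int) t => d.insert t (d.getD t 0 + 1))).symm).trans
          (PySem.Dict.foldl_insert_getD_add_one_eq_counter _)
      rw [hcounts, PySem.List.foldl_append_singleton_eq_map, pv_aSorted_spec, List.map_map]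
      -- B's loop
      have hSsort : S.Pairwise (· ≤ ·) := PySem.List.sorted_pairwise ts (fun x => x)
      rw [pv_bLoop_spec S.length S (Nat.le_refl _) hSsort, pv_ofList_sorted]
      have hScount : ∀ k, S.count k = ts.count k :=
        (PySem.List.sorted_perm ts (fun x => x) false).count_eq
      rw [List.map_congr_left (fun k _ => by simp [Function.comp, hScount] :
        ∀ k ∈ PySem.List.sorted (PySem.Set.ofList ts) (fun x => x) false,
          ((fun p => "- " ++ PySem.Int.toStr p.2 ++ " × " ++ p.1) ∘
            fun k => (k, ((ts.count k : Nat) : Int))) k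
            = "- " ++ PySem.Int.toStr ((S.count k : Nat) : Int) ++ " × " ++ k)]
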